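-- pv_equiv track=rewrite | github.com/AP-MI-2021/lab-4-dariussandru | main.py | nr_pare_unicate
-- ===== SOURCE A (Python) =====
-- def nr_pare_unicate(lista):
--     """
--     functia identifica numerele pare din lista ce apar o singura data
--     :param lista: lista de nr intregi
--     :return: lista doar cu numerele pare ce apar o singura data
--     """
--     rezultat = []
--     nr_aparitii=0
--     for x in lista:
--         nr_aparitii=lista.count(x)
--         if nr_aparitii == 1 and x % 2 == 0:
--             rezultat.append(x)
--
--     return rezultat
-- ===== SOURCE B (Python) =====
-- def nr_pare_unicate(lista):
--     counter = {}
--     for x in lista: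
--         counter[x] = counter.get(x, 0) + 1
--     rezultat = []
--     for val, cnt in counter.items():
--         if cnt == 1 and val % 2 == 0:
--             rezultat.append(val)
--     return rezultat
-- ===== Notes on version B (the rewrite author's own statement) =====
-- stated objective: faster
-- what changed: Replaces the per-element lista.count(x) rescan (quadratic) by one frequency-table pass plus a loop over the table's distinct keys in first-occurrence order.
import Mathlib
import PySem

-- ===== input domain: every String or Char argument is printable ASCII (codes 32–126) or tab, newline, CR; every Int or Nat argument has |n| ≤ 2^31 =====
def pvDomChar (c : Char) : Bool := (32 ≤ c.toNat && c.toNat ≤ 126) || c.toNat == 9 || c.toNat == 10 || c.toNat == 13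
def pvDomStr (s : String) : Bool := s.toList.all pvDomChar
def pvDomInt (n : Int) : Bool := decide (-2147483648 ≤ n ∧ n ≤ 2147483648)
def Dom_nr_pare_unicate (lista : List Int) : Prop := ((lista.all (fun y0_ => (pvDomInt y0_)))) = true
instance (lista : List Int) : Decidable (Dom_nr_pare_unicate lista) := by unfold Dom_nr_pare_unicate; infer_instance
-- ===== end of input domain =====

-- B replaces A's per-element lista.count(x) rescan by one frequency-table pass plus a loop over distinct keys (faster).

-- ===== PORT A =====
-- for x in lista: nr_aparitii = lista.count(x); if nr_aparitii == 1 and x % 2 == 0: rezultat.append(x)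
def nr_pare_unicate (lista : List Int) : List Int :=
  lista.foldl
    (fun rezultat x =>
      if (PySem.List.count lista x : Int) = 1 ∧ PySem.Int.mod x 2 = 0 then
        rezultat ++ [x]
      else rezultat)
    []

-- ===== PORT B =====
-- counter[x] = counter.get(x, 0) + 1 over lista, then iterate counter.items()
def nr_pare_unicate_alt (lista : List Int) : List Int :=
  ((lista.foldl (fun d x => d.insert x (d.getD x 0 + 1))
      (PySem.Dict.empty : PySem.Dict Int Int)).items).foldl
    (fun rezultat p =>
      if p.2 = 1 ∧ PySem.Int.mod p.1 2 = 0 then rezultat ++ [p.1] else rezultat)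
    []

-- ===== PRECONDITION & SPEC =====
def Spec_nr_pare_unicate (lista : List Int) (out : List Int) : Prop := out = nr_pare_unicate_alt lista
instance (lista : List Int) (out : List Int) : Decidable (Spec_nr_pare_unicate lista out) := by unfold Spec_nr_pare_unicate; infer_instance

-- ===== CLAIM (what is proved, stated in full; the proofs are below) =====
def Claim_equal_nr_pare_unicate : Prop := ∀ (lista : List Int), Dom_nr_pare_unicate lista → Spec_nr_pare_unicate lista (nr_pare_unicate lista)

-- ===== LEMMAS AND PROOFS =====

-- Filtering by a predicate whose elements occur at most once in the original list gives the
-- same result over the dedup (Set.ofList) as over the list itself; generalized over the accumulator.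
theorem filter_foldl_add (p : Int → Bool) :
    ∀ (l s : List Int), (∀ x, p x = true → x ∈ s → List.count x l = 0) →
      (∀ x, p x = true → List.count x l ≤ 1) →
      (l.foldl PySem.Set.add s).filter p = s.filter p ++ l.filter p := by
  intro l
  induction l with
  | nil => intro s _ _; simp
  | cons a l ih =>
    intro s hs hc
    simp only [List.foldl_cons]
    by_cases hpa : p a = true
    · have hmem : a ∉ s := by
        intro hin
        have := hs a hpa hin
        simp at this
      have hla : List.count a l = 0 := by
        have := hc a hpa
        simp at this
        omega
      have hadd : PySem.Set.add s a = s ++ [a] := by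
        simp [PySem.Set.add, PySem.Set.contains]
        intro h; exact absurd h hmem
      rw [hadd, ih (s ++ [a])]
      · simp [List.filter_append, hpa]
      · intro x hx hxs
        rcases List.mem_append.1 hxs with h | h
        · have := hs x hx h
          have hle := ((List.sublist_cons_self a l).count_le x)
          omega
        · simp at h; subst h; exact hla
      · intro x hx
        have := hc x hx
        simp [List.count_cons] at this ⊢
        omega
    · have hpa' : p a = false := by simpa using hpa
      by_cases hmem : a ∈ s
      · have hadd : PySem.Set.add s a = s := by
          simp [PySem.Set.add, PySem.Set.contains, hmem]
        rw [hadd, ih s]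
        · simp [hpa']
        · intro x hx hxs
          have := hs x hx hxs
          have hle := ((List.sublist_cons_self a l).count_le x)
          omega
        · intro x hx
          have := hc x hx
          simp [List.count_cons] at this ⊢
          omega
      · have hadd : PySem.Set.add s a = s ++ [a] := by
          simp [PySem.Set.add, PySem.Set.contains]
          intro h; exact absurd h hmem
        rw [hadd, ih (s ++ [a])]
        · simp [List.filter_append, hpa']
        · intro x hx hxs
          rcases List.mem_append.1 hxs with h | h
          · have := hs x hx h
            have hle := ((List.sublist_cons_self a l).count_le x)
            omega
          · simp at h; subst h; exact absurd hx (by simp [hpa'])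
        · intro x hx
          have := hc x hx
          simp [List.count_cons] at this ⊢
          omega

theorem filter_ofList (p : Int → Bool) (l : List Int)
    (hc : ∀ x, p x = true → List.count x l ≤ 1) :
    (PySem.Set.ofList l).filter p = l.filter p := by
  rw [PySem.Set.ofList_eq_foldl, filter_foldl_add p l [] (by simp) hc]
  simp

-- ===== VERDICT (by name: the statement is the Claim_ definition above) =====
theorem nr_pare_unicate_spec : Claim_equal_nr_pare_unicate := by
  intro lista _
  unfold Spec_nr_pare_unicate nr_pare_unicate nr_pare_unicate_alt
  rw [PySem.Dict.foldl_insert_getD_add_one_eq_counter, PySem.Dict.items_counter,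
    List.foldl_map]
  have hA := PySem.List.foldl_append_ite_eq_filter
    (fun x : Int => (PySem.List.count lista x : Int) = 1 ∧ PySem.Int.mod x 2 = 0) lista []
  have hB := PySem.List.foldl_append_ite_eq_filter
    (fun x : Int => ((List.count x lista : Int) = 1 ∧ PySem.Int.mod x 2 = 0))
    (PySem.Set.ofList lista) []
  simp only [List.nil_append] at hA hB
  rw [hA, hB]
  rw [filter_ofList _ lista]
  · rfl
  · intro x hx
    simp only [decide_eq_true_eq] at hx ⊢
    omega
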